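-- pv_equiv track=rewrite | github.com/TonyZherdeff/Website | utils.py | simple_list_create
-- ===== SOURCE A (Python) =====
-- def simple_list_create(num_start, num_end) -> str:
--     simple_list = []
--     i = num_start
--     while i <= num_end:
--         if is_prime(i):
--             simple_list.append(str(i))
--         i += 1
--     return " ".join(simple_list)
--
-- def is_prime(x):
--     for i in range(2, (x//2)+1):
--         if x % i == 0:
--             return False
--     return True
-- ===== SOURCE B (Python) =====
-- def simple_list_create(num_start, num_end) -> str:
--     return " ".join(str(i) for i in range(num_start, num_end + 1) if _is_prime_fast(i))
--
-- def _is_prime_fast(x):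
--     # A's trial division accepts every x <= 2 (empty range); keep that, but
--     # for x >= 3 test only odd divisors d with d*d <= x.
--     if x <= 2:
--         return True
--     if x % 2 == 0:
--         return False
--     d = 3
--     while d * d <= x:
--         if x % d == 0:
--             return False
--         d += 2
--     return True
-- ===== Notes on version B (the rewrite author's own statement) =====
-- stated objective: alternative
-- what changed: B replaces the per-number trial division over all of range(2, x//2+1) by an even check plus odd-divisor trial division while d*d <= x, and builds the result as a filtered range comprehension instead of a while loop with an accumulator list, keeping A's quirk that every x <= 2 joins the list.
import Mathlib
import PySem

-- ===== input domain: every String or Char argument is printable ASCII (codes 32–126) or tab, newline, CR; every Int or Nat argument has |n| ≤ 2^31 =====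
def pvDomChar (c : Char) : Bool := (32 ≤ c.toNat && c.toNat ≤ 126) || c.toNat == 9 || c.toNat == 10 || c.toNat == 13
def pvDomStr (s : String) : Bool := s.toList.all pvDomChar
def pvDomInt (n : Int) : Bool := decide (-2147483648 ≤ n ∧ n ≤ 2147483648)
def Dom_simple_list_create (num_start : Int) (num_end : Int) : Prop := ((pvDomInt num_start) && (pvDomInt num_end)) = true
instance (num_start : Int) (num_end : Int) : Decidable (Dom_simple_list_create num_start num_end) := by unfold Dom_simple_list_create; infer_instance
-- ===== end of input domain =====

-- B joins a filtered range using sqrt-bounded odd trial division instead of A's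
-- while-loop with per-number trial division over the whole range up to x//2.

-- ===== PORT A =====
-- for i in range(2, (x//2)+1): if x % i == 0: return False; return True
def is_prime_go (x : Int) : List Int → Bool
  | [] => true
  | i :: rest => if PySem.Int.mod x i == 0 then false else is_prime_go x rest

def is_prime (x : Int) : Bool :=
  is_prime_go x (PySem.List.pyRange 2 (PySem.Int.floordiv x 2 + 1) 1)

-- while i <= num_end: if is_prime(i): simple_list.append(str(i)); i += 1
def slc_loop (num_end : Int) (i : Int) (acc : List String) : List String :=
  if i ≤ num_end then
    slc_loop num_end (i + 1) (if is_prime i then acc ++ [PySem.Int.toStr i] else acc)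
  else acc
termination_by (num_end + 1 - i).toNat
decreasing_by omega

def simple_list_create (num_start : Int) (num_end : Int) : String :=
  PySem.Str.join " " (slc_loop num_end num_start [])

-- ===== PORT B =====
-- while d*d <= x: if x % d == 0: return False; d += 2; return True
def is_prime_fast_loop (x : Int) (d : Int) : Bool :=
  if d * d ≤ x then
    if PySem.Int.mod x d == 0 then false else is_prime_fast_loop x (d + 2)
  else true
termination_by (x + 2 - d).toNat
decreasing_by
  have hdx : d ≤ x := by nlinarith [sq_nonneg d, sq_nonneg (d - 1)]
  omega

def is_prime_fast (x : Int) : Bool :=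
  if x ≤ 2 then true
  else if PySem.Int.mod x 2 == 0 then false
  else is_prime_fast_loop x 3

def simple_list_create_alt (num_start : Int) (num_end : Int) : String :=
  PySem.Str.join " "
    (((PySem.List.pyRange num_start (num_end + 1) 1).filter is_prime_fast).map PySem.Int.toStr)

-- ===== PRECONDITION & SPEC =====
def Spec_simple_list_create (num_start : Int) (num_end : Int) (out : String) : Prop := out = simple_list_create_alt num_start num_end
instance (num_start : Int) (num_end : Int) (out : String) : Decidable (Spec_simple_list_create num_start num_end out) := by unfold Spec_simple_list_create; infer_instance

-- ===== CLAIM (what is proved, stated in full; the proofs are below) =====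
def Claim_equal_simple_list_create : Prop := ∀ (num_start : Int) (num_end : Int), Dom_simple_list_create num_start num_end → Spec_simple_list_create num_start num_end (simple_list_create num_start num_end)

-- ===== LEMMAS AND PROOFS =====

lemma is_prime_go_eq_true (x : Int) (l : List Int) :
    is_prime_go x l = true ↔ ∀ i ∈ l, ¬ i ∣ x := by
  induction l with
  | nil => simp [is_prime_go]
  | cons a t ih =>
    simp only [is_prime_go, beq_iff_eq, PySem.Int.mod_eq_zero_iff_dvd]
    by_cases h : a ∣ x
    · simp [h]
    · simp [h, ih]

lemma is_prime_iff (x : Int) :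
    is_prime x = true ↔ ∀ i : Int, 2 ≤ i → i * 2 ≤ x → ¬ i ∣ x := by
  rw [is_prime, is_prime_go_eq_true]
  constructor
  · intro h i h2 hix
    exact h i (by
      rw [PySem.List.mem_pyRange_one]
      have : i ≤ PySem.Int.floordiv x 2 := (PySem.Int.le_floordiv_iff_mul_le (by norm_num)).mpr hix
      omega)
  · intro h i hi
    rw [PySem.List.mem_pyRange_one] at hi
    have : i ≤ PySem.Int.floordiv x 2 := by omega
    exact h i hi.1 ((PySem.Int.le_floordiv_iff_mul_le (by norm_num)).mp this)

lemma is_prime_fast_loop_iff_aux : ∀ (n : Nat) (x d : Int), (x + 2 - d).toNat ≤ n → 3 ≤ d → d % 2 = 1 →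
    (is_prime_fast_loop x d = true ↔ ∀ e : Int, d ≤ e → e % 2 = 1 → e * e ≤ x → ¬ e ∣ x) := by
  intro n
  induction n with
  | zero =>
    intro x d hn hd _
    rw [is_prime_fast_loop]
    have hxd : ¬ d * d ≤ x := by
      intro h
      have hdx : d ≤ x := by nlinarith
      omega
    simp only [hxd, if_false]
    constructor
    · intro _ e he _ hee hdvd
      have : d * d ≤ e * e := by nlinarith
      exact hxd (by omega)
    · intro _; trivial
  | succ n ih =>
    intro x d hn hd hodd
    rw [is_prime_fast_loop]
    by_cases hxd : d * d ≤ x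
    · simp only [hxd, if_true, beq_iff_eq, PySem.Int.mod_eq_zero_iff_dvd]
      by_cases hdvd : d ∣ x
      · simp only [hdvd, if_true]
        constructor
        · intro h; exact absurd h (by simp)
        · intro h; exact absurd hdvd (h d le_rfl hodd hxd)
      · simp only [hdvd, if_false]
        have hdx : d ≤ x := by nlinarith
        rw [ih x (d + 2) (by omega) (by omega) (by omega)]
        constructor
        · intro h e he heo hee hed
          rcases eq_or_lt_of_le he with rfl | hlt
          · exact hdvd hed
          · exact h e (by omega) heo hee hed
        · intro h e he heo hee hed
          exact h e (by omega) heo hee hed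
    · simp only [hxd, if_false]
      constructor
      · intro _ e he _ hee hdvd
        have : d * d ≤ e * e := by nlinarith
        exact hxd (by omega)
      · intro _; trivial

lemma is_prime_fast_loop_iff (x : Int) :
    is_prime_fast_loop x 3 = true ↔ ∀ e : Int, 3 ≤ e → e % 2 = 1 → e * e ≤ x → ¬ e ∣ x :=
  is_prime_fast_loop_iff_aux (x + 2 - 3).toNat x 3 le_rfl (by norm_num) (by norm_num)

lemma half_iff_sqrt (x : Int) (hx : 3 ≤ x) (h2 : ¬ (2:Int) ∣ x) :
    (∀ i : Int, 2 ≤ i → i * 2 ≤ x → ¬ i ∣ x) ↔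
    (∀ e : Int, 3 ≤ e → e % 2 = 1 → e * e ≤ x → ¬ e ∣ x) := by
  constructor
  · intro h e he _ hee hdvd
    obtain ⟨k, hk⟩ := hdvd
    have hek : e ≤ k := by nlinarith
    exact h e (by omega) (by nlinarith) ⟨k, hk⟩
  · intro h i hi hix hdvd
    set n := x.toNat with hn
    have hxn : x = (n : Int) := by omega
    have hin : (i.toNat : Int) = i := by omega
    have hidvd : i.toNat ∣ n := by
      rw [← Int.natCast_dvd_natCast, hin, ← hxn]; exact hdvd
    have hnp : ¬ n.Prime := by
      intro hp
      rcases (Nat.Prime.eq_one_or_self_of_dvd hp i.toNat hidvd) with h1 | h1 <;> omega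
    have hmf : n.minFac ∣ n := Nat.minFac_dvd n
    have hmp : n.minFac.Prime := Nat.minFac_prime (by omega)
    have hsq : n.minFac * n.minFac ≤ n := by
      have h := Nat.minFac_sq_le_self (n := n) (by omega) hnp
      rw [pow_two] at h
      exact h
    by_cases h2' : n.minFac = 2
    · apply h2
      have h2n : 2 ∣ n := h2' ▸ hmf
      rw [hxn]
      exact_mod_cast Int.natCast_dvd_natCast.mpr h2n
    · have hge : 3 ≤ n.minFac := by
        have := hmp.two_le; omega
      have hoddp : n.minFac % 2 = 1 := by
        rcases Nat.mod_two_eq_zero_or_one n.minFac with h | h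
        · have h2d : 2 ∣ n.minFac := Nat.dvd_of_mod_eq_zero h
          rcases (Nat.Prime.eq_one_or_self_of_dvd hmp 2 h2d) with h1 | h1 <;> omega
        · exact h
      exact h (n.minFac : Int) (by exact_mod_cast hge) (by omega)
        (by rw [hxn]; exact_mod_cast hsq)
        (by rw [hxn]; exact_mod_cast hmf)

lemma is_prime_eq (x : Int) : is_prime x = is_prime_fast x := by
  unfold is_prime_fast
  by_cases hx : x ≤ 2
  · rw [if_pos hx, is_prime, PySem.List.pyRange_one_eq_nil (by
      by_contra hc
      have h2 : 2 ≤ PySem.Int.floordiv x 2 := by omega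
      have := (PySem.Int.le_floordiv_iff_mul_le (by norm_num)).mp h2
      omega)]
    rfl
  · have hx3 : 3 ≤ x := by omega
    rw [if_neg hx]
    by_cases h2 : (2:Int) ∣ x
    · rw [if_pos (by simp [h2])]
      have hA : ¬ (is_prime x = true) := by
        rw [is_prime_iff]
        intro h
        exact h 2 le_rfl (by omega) h2
      simp only [Bool.not_eq_true] at hA
      exact hA
    · rw [if_neg (by simp [h2])]
      have hiff := (is_prime_iff x).trans ((half_iff_sqrt x hx3 h2).trans (is_prime_fast_loop_iff x).symm)
      cases hA : is_prime x <;> cases hB : is_prime_fast_loop x 3 <;> simp_all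

lemma slc_loop_eq_aux : ∀ (n : Nat) (num_end i : Int) (acc : List String), (num_end + 1 - i).toNat ≤ n →
    slc_loop num_end i acc = acc ++ ((PySem.List.pyRange i (num_end + 1) 1).filter is_prime).map PySem.Int.toStr := by
  intro n
  induction n with
  | zero =>
    intro ne i acc hn
    rw [slc_loop, PySem.List.pyRange_one_eq_nil (by omega)]
    simp only [show ¬ i ≤ ne by omega, if_false, List.filter_nil, List.map_nil, List.append_nil]
  | succ n ih =>
    intro ne i acc hn
    rw [slc_loop]
    by_cases hi : i ≤ ne
    · simp only [hi, if_true]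
      rw [ih ne (i + 1) (if is_prime i then acc ++ [PySem.Int.toStr i] else acc) (by omega)]
      rw [show PySem.List.pyRange i (ne + 1) 1 = i :: PySem.List.pyRange (i + 1) (ne + 1) 1 from
        PySem.List.pyRange_one_cons (by omega)]
      by_cases hp : is_prime i
      · simp [hp, List.filter_cons]
      · simp [hp, List.filter_cons]
    · simp only [hi, if_false]
      rw [PySem.List.pyRange_one_eq_nil (by omega)]
      simp

lemma slc_loop_eq (num_end i : Int) (acc : List String) :
    slc_loop num_end i acc = acc ++ ((PySem.List.pyRange i (num_end + 1) 1).filter is_prime).map PySem.Int.toStr :=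
  slc_loop_eq_aux (num_end + 1 - i).toNat num_end i acc le_rfl

-- ===== VERDICT (by name: the statement is the Claim_ definition above) =====
theorem simple_list_create_spec : Claim_equal_simple_list_create := by
  intro ns ne _
  unfold Spec_simple_list_create simple_list_create simple_list_create_alt
  rw [slc_loop_eq, List.nil_append]
  have hfun : is_prime = is_prime_fast := funext is_prime_eq
  rw [hfun]
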